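-- pv_equiv track=rewrite | github.com/noaakayad/Python-Programs | Lists, Strings, Tuples 2/hw02.py | name_mapping
-- ===== SOURCE A (Python) =====
-- def name_mapping(given_names, preferred_names):
--     """
--     ##############################################################
--     #Here, as the list of given names is at most as long as the
--     list of preferred names, I do a 'for i in
--     range(len(preferred_names)' for loop and I assume that when 'i'
--     is exceed the length of 'given_names', we have seen every persons
--     that want to use another name which makes me associate 'NO NAME PROVIDED'
--     with a preferred name, otherwise, I associate a given name with it
--     preferred name that I add to a list named 'fav_names' that is first empty.#
--     ##############################################################
--
--     >>> given_names = ['Amanda', 'Jeffrey', 'Richard']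
--     >>> preferred_names = ['Mandy', 'Jeff', 'Rick']
--     >>> name_mapping(given_names, preferred_names)
--     [('Amanda', 'Mandy'), ('Jeffrey', 'Jeff'), ('Richard', 'Rick')]
--
--     >>> given_names = ['Amanda', 'Jeffrey']
--     >>> preferred_names = ['Mandy', 'Jeff', 'Rick']
--     >>> name_mapping(given_names, preferred_names)
--     [('Amanda', 'Mandy'), ('Jeffrey', 'Jeff'), ('NO NAME PROVIDED', 'Rick')]
--
--     >>> given_names = []
--     >>> preferred_names = ['Mandy', 'Jeff', 'Rick']
--     >>> name_mapping(given_names, preferred_names)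
--     [('NO NAME PROVIDED', 'Mandy'), ('NO NAME PROVIDED', 'Jeff'), \
-- ('NO NAME PROVIDED', 'Rick')]
--
--     # Add at least 3 doctests below here #
--
--     >>> given_names = ['Noa', 'Akayad']
--     >>> preferred_names = ['Nou7a', 'Noa A.']
--     >>> name_mapping(given_names, preferred_names)
--     [('Noa', 'Nou7a'), ('Akayad', 'Noa A.')]
--
--     >>> given_names = ['Noa']
--     >>> preferred_names = ['Nou7a', 'Noa A.', 'N. Akayad']
--     >>> name_mapping(given_names, preferred_names)
--     [('Noa', 'Nou7a'), ('NO NAME PROVIDED', 'Noa A.'), \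
-- ('NO NAME PROVIDED', 'N. Akayad')]
--
--     >>> given_names = ['Noa']
--     >>> preferred_names = ['Nou7a']
--     >>> name_mapping(given_names, preferred_names)
--     [('Noa', 'Nou7a')]
--     """
--
--     if len(preferred_names) == 0 :
--         return []
--
--     fav_names = []
--
--     for i in range(len(preferred_names)):
--         if (len(given_names)-1) - i >= 0 :
--             fav_names.append((given_names[i], preferred_names[i]))
--         else :
--             fav_names.append(('NO NAME PROVIDED', preferred_names[i]))
--
--     return fav_names
-- ===== SOURCE B (Python) =====
-- def name_mapping(given_names, preferred_names):
--     pad = list(given_names) + ['NO NAME PROVIDED'] * (len(preferred_names) - len(given_names))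
--     return list(zip(pad, preferred_names))
-- ===== Notes on version B (the rewrite author's own statement) =====
-- stated objective: idiomatic
-- what changed: Replaces the per-index loop with an index test in each iteration by building a padded given-names list once and zipping it with the preferred names.
import Mathlib
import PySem

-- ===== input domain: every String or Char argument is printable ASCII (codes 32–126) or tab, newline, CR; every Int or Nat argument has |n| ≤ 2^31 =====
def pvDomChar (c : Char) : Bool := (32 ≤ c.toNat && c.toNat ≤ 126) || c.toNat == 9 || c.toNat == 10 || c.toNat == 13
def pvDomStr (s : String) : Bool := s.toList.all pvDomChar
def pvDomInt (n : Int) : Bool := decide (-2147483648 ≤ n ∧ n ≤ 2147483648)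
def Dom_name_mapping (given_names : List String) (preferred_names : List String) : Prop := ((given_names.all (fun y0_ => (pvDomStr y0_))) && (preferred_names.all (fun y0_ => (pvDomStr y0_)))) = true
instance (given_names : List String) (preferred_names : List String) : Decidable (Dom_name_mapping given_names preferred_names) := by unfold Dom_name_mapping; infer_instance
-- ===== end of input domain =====

-- B replaces A's per-index loop (with an in-bounds test at every index) by padding the
-- given-names list once and zipping it with the preferred names (objective: idiomatic).

-- ===== PORT A =====
def name_mapping (given_names : List String) (preferred_names : List String) : List (String × String) :=
  if PySem.List.len preferred_names = 0 then []
  else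
    (PySem.List.pyRange 0 (PySem.List.len preferred_names) 1).foldl
      (fun fav_names i =>
        if PySem.List.len given_names - 1 - i ≥ 0 then
          fav_names ++ [(PySem.List.pyGetD given_names i "", PySem.List.pyGetD preferred_names i "")]
        else
          fav_names ++ [("NO NAME PROVIDED", PySem.List.pyGetD preferred_names i "")]) []

-- ===== PORT B =====
def name_mapping_alt (given_names : List String) (preferred_names : List String) : List (String × String) :=
  (given_names ++ List.replicate (preferred_names.length - given_names.length) "NO NAME PROVIDED").zip
    preferred_names

-- ===== PRECONDITION & SPEC =====
def Spec_name_mapping (given_names : List String) (preferred_names : List String) (out : List (String × String)) : Prop := out = name_mapping_alt given_names preferred_names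
instance (given_names : List String) (preferred_names : List String) (out : List (String × String)) : Decidable (Spec_name_mapping given_names preferred_names out) := by unfold Spec_name_mapping; infer_instance

-- ===== CLAIM (what is proved, stated in full; the proofs are below) =====
def Claim_equal_name_mapping : Prop := ∀ (given_names : List String) (preferred_names : List String), Dom_name_mapping given_names preferred_names → Spec_name_mapping given_names preferred_names (name_mapping given_names preferred_names)

-- ===== LEMMAS AND PROOFS =====

theorem name_mapping_eq_alt (g p : List String) : name_mapping g p = name_mapping_alt g p := by
  unfold name_mapping name_mapping_alt
  by_cases hp : p = []
  · simp [hp, PySem.List.len]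
  · have hlen : p.length ≠ 0 := by simpa using hp
    simp only [PySem.List.len_eq]
    rw [if_neg (by exact_mod_cast hlen)]
    -- turn the branch-on-append loop body into append-of-a-branch, then into a map
    have hbody :
        (fun (fav_names : List (String × String)) (i : Int) =>
          if (g.length : Int) - 1 - i ≥ 0 then
            fav_names ++ [(PySem.List.pyGetD g i "", PySem.List.pyGetD p i "")]
          else
            fav_names ++ [("NO NAME PROVIDED", PySem.List.pyGetD p i "")]) =
        (fun fav_names i =>
          fav_names ++ [if (g.length : Int) - 1 - i ≥ 0 then
              (PySem.List.pyGetD g i "", PySem.List.pyGetD p i "")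
            else ("NO NAME PROVIDED", PySem.List.pyGetD p i "")]) := by
      funext fav i; split <;> rfl
    refine Eq.trans (congrArg (fun φ => List.foldl φ ([] : List (String × String))
      (PySem.List.pyRange 0 (p.length : Int) 1)) hbody) ?_
    beta_reduce
    rw [PySem.List.foldl_append_singleton_eq_map, List.nil_append, PySem.List.pyRange_one]
    simp only [sub_zero, Int.toNat_natCast, List.map_map]
    apply List.ext_getElem
    · simp [List.length_zip]; omega
    · intro i hi₁ hi₂
      have hip : i < p.length := by simpa using hi₁
      simp only [List.getElem_map, Function.comp_apply, zero_add, List.getElem_zip,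
        List.getElem_range]
      by_cases hig : i < g.length
      · rw [if_pos (by omega)]
        rw [List.getElem_append_left hig]
        simp [PySem.List.pyGetD_natCast, List.getD_eq_getElem?_getD,
          List.getElem?_eq_getElem hig, List.getElem?_eq_getElem hip]
      · rw [if_neg (by omega)]
        rw [List.getElem_append_right (by omega)]
        simp [List.getElem_replicate, PySem.List.pyGetD_natCast,
          List.getD_eq_getElem?_getD, List.getElem?_eq_getElem hip]

-- ===== VERDICT (by name: the statement is the Claim_ definition above) =====
theorem name_mapping_spec : Claim_equal_name_mapping := by
  intro g p _
  exact name_mapping_eq_alt g p
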